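-- pv_equiv track=rewrite | github.com/Khobaib-a/password-chekcer | main.py | check_character_types
-- ===== SOURCE A (Python) =====
-- def check_character_types(password):
--     """
--     Function 2: Check how many different types of characters exist.
--     Add 10 points for each type (spaces are allowed, no penalty).
--
--     Types: uppercase, lowercase, numbers, special symbols
--     """
--     has_uppercase = False
--     has_lowercase = False
--     has_numbers = False
--     has_special = False
--
--     for char in password:
--         if char.isupper():
--             has_uppercase = True
--         elif char.islower():
--             has_lowercase = True
--         elif char.isdigit():
--             has_numbers = True
--         elif not char.isspace():  # Not a space and not alphanumeric
--             has_special = True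
--
--     types_count = sum([has_uppercase, has_lowercase, has_numbers, has_special])
--
--     return types_count * 10
-- ===== SOURCE B (Python) =====
-- def check_character_types(password):
--     has_upper = any(c.isupper() for c in password)
--     has_lower = any(c.islower() for c in password)
--     has_digit = any(c.isdigit() for c in password)
--     has_special = any(not c.isupper() and not c.islower() and not c.isdigit()
--                       and not c.isspace() for c in password)
--     return sum([has_upper, has_lower, has_digit, has_special]) * 10
-- ===== Notes on version B (the rewrite author's own statement) =====
-- stated objective: idiomatic
-- what changed: Replaced A's single stateful loop with four boolean flags and an elif chain by four independent any() generator scans, one per character category, summed directly.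
import Mathlib
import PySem

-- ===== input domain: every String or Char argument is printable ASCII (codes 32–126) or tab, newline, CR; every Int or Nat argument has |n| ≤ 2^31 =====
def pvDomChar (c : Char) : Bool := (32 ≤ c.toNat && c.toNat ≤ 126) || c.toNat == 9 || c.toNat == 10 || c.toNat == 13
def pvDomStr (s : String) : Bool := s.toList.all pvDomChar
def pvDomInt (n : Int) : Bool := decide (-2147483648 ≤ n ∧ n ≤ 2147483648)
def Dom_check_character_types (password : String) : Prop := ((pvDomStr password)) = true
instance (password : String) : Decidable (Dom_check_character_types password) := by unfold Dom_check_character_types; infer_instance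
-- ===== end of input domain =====

-- B replaces A's single four-flag loop with four independent any-scans, one per category (idiomatic decomposition).

-- ===== PORT A =====
def pvStepA (st : Bool × Bool × Bool × Bool) (c : Char) : Bool × Bool × Bool × Bool :=
  if PySem.Chars.isupper c then (true, st.2.1, st.2.2.1, st.2.2.2)
  else if PySem.Chars.islower c then (st.1, true, st.2.2.1, st.2.2.2)
  else if PySem.Chars.isdigit c then (st.1, st.2.1, true, st.2.2.2)
  else if !(PySem.Chars.isspace c) then (st.1, st.2.1, st.2.2.1, true)
  else st

def check_character_types (password : String) : Int :=
  let st := password.toList.foldl pvStepA (false, false, false, false)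
  let types_count : Int :=
    (if st.1 then 1 else 0) + (if st.2.1 then 1 else 0) +
    (if st.2.2.1 then 1 else 0) + (if st.2.2.2 then 1 else 0)
  types_count * 10

-- ===== PORT B =====
def pvSpecialB (c : Char) : Bool :=
  !(PySem.Chars.isupper c) && !(PySem.Chars.islower c) &&
  !(PySem.Chars.isdigit c) && !(PySem.Chars.isspace c)

def check_character_types_alt (password : String) : Int :=
  let cs := password.toList
  let has_upper := cs.any PySem.Chars.isupper
  let has_lower := cs.any PySem.Chars.islower
  let has_digit := cs.any PySem.Chars.isdigit
  let has_special := cs.any pvSpecialB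
  ((if has_upper then 1 else 0) + (if has_lower then 1 else 0) +
   (if has_digit then 1 else 0) + (if has_special then 1 else 0)) * 10

-- ===== PRECONDITION & SPEC =====
def Spec_check_character_types (password : String) (out : Int) : Prop := out = check_character_types_alt password
instance (password : String) (out : Int) : Decidable (Spec_check_character_types password out) := by unfold Spec_check_character_types; infer_instance

-- ===== CLAIM (what is proved, stated in full; the proofs are below) =====
def Claim_equal_check_character_types : Prop := ∀ (password : String), Dom_check_character_types password → Spec_check_character_types password (check_character_types password)

-- ===== LEMMAS AND PROOFS =====
lemma pv_upper_disj (c : Char) (h : PySem.Chars.isupper c = true) :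
    PySem.Chars.islower c = false ∧ PySem.Chars.isdigit c = false := by
  simp only [PySem.Chars.isupper, Bool.and_eq_true, decide_eq_true_eq, Char.le_def,
    UInt32.le_iff_toNat_le, show 'A'.val.toNat = 65 from rfl, show 'Z'.val.toNat = 90 from rfl] at h
  simp only [PySem.Chars.islower, PySem.Chars.isdigit, Char.le_def,
    UInt32.le_iff_toNat_le, Bool.and_eq_false_iff, decide_eq_false_iff_not, not_le,
    show 'a'.val.toNat = 97 from rfl, show 'z'.val.toNat = 122 from rfl,
    show '0'.val.toNat = 48 from rfl, show '9'.val.toNat = 57 from rfl]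
  omega

lemma pv_lower_disj (c : Char) (h : PySem.Chars.islower c = true) :
    PySem.Chars.isdigit c = false := by
  simp only [PySem.Chars.islower, Bool.and_eq_true, decide_eq_true_eq, Char.le_def,
    UInt32.le_iff_toNat_le, show 'a'.val.toNat = 97 from rfl, show 'z'.val.toNat = 122 from rfl] at h
  simp only [PySem.Chars.isdigit, Char.le_def, UInt32.le_iff_toNat_le, Bool.and_eq_false_iff,
    decide_eq_false_iff_not, not_le,
    show '0'.val.toNat = 48 from rfl, show '9'.val.toNat = 57 from rfl]
  omega

lemma pv_loop_eq (cs : List Char) (u l d s : Bool) :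
    cs.foldl pvStepA (u, l, d, s) =
      (u || cs.any PySem.Chars.isupper, l || cs.any PySem.Chars.islower,
       d || cs.any PySem.Chars.isdigit, s || cs.any pvSpecialB) := by
  induction cs generalizing u l d s with
  | nil => simp
  | cons c cs ih =>
    simp only [List.foldl_cons, List.any_cons, pvStepA]
    by_cases hu : PySem.Chars.isupper c = true
    · obtain ⟨hl, hd⟩ := pv_upper_disj c hu
      simp [hu, hl, hd, ih, pvSpecialB]
    · rw [Bool.not_eq_true] at hu
      by_cases hl : PySem.Chars.islower c = true
      · have hd := pv_lower_disj c hl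
        simp [hu, hl, hd, ih, pvSpecialB]
      · rw [Bool.not_eq_true] at hl
        by_cases hd : PySem.Chars.isdigit c = true
        · simp [hu, hl, hd, ih, pvSpecialB]
        · rw [Bool.not_eq_true] at hd
          by_cases hs : PySem.Chars.isspace c = true
          · simp [hu, hl, hd, hs, ih, pvSpecialB]
          · rw [Bool.not_eq_true] at hs
            simp [hu, hl, hd, hs, ih, pvSpecialB]

-- ===== VERDICT (by name: the statement is the Claim_ definition above) =====
theorem check_character_types_spec : Claim_equal_check_character_types := by
  intro password _
  unfold Spec_check_character_types check_character_types check_character_types_alt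
  simp only [pv_loop_eq, Bool.false_or]
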